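-- pv_equiv track=rewrite | github.com/2023ATAI/CoLM-Python-Version-1 | CoLM_TimeManager.py | minutes_since_1900
-- ===== SOURCE A (Python) =====
-- def isleapyear(year):
--     # Check if the year is a leap year
--     return (year % 4 == 0 and year % 100 != 0) or (year % 400 == 0)
--
-- def minutes_since_1900(year, julianday, second):
--     refyear = [1, 1900, 1950, 1980, 1990, 2000, 2005, 2010, 2015, 2020]
--     refval = [-998776800, 0, 26297280, 42075360, 47335680, 52594560, 55225440,
--               57854880, 60484320, 63113760]
--
--     iref = max(i for i, y in enumerate(refyear) if y <= year)
--     minutes = refval[iref]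
--
--     for iyear in range(refyear[iref], year):
--         if isleapyear(iyear):
--             minutes += 527040
--         else:
--             minutes += 525600
--
--     minutes += (julianday - 1) * 1440
--     minutes += second // 60
--
--     return minutes
-- ===== SOURCE B (Python) =====
-- def minutes_since_1900(year, julianday, second):
--     # Closed form: leap years in [1, year-1] via floor counts; no per-year loop.
--     leaps = (year - 1) // 4 - (year - 1) // 100 + (year - 1) // 400
--     days = 365 * (year - 1900) + leaps - 460
--     return days * 1440 + (julianday - 1) * 1440 + second // 60
-- ===== Notes on version B (the rewrite author's own statement) =====
-- stated objective: faster
-- what changed: Replaced the reference-table lookup plus per-year loop with a closed-form Gregorian leap-year count floor((y-1)/4)-floor((y-1)/100)+floor((y-1)/400), computing the minutes in O(1).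
import Mathlib
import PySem

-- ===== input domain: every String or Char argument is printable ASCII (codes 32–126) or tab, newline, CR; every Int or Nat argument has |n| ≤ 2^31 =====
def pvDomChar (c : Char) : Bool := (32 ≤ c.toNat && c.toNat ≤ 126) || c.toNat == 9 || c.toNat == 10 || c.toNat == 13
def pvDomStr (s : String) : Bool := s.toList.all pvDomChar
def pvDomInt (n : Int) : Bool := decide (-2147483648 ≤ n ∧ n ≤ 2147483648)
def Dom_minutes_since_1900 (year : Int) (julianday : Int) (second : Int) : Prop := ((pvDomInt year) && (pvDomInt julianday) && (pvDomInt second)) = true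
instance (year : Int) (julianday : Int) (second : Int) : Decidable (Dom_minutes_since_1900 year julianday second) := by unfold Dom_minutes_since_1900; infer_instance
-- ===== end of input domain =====

-- B replaces A's reference table + per-year loop by a closed-form Gregorian leap-year count (O(1) instead of O(year)).

-- ===== PORT A =====
def isleapyear (year : Int) : Bool :=
  (PySem.Int.mod year 4 == 0 && !(PySem.Int.mod year 100 == 0)) || PySem.Int.mod year 400 == 0

def pvRefyear : List Int := [1, 1900, 1950, 1980, 1990, 2000, 2005, 2010, 2015, 2020]
def pvRefval : List Int := [-998776800, 0, 26297280, 42075360, 47335680, 52594560, 55225440,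
                            57854880, 60484320, 63113760]

def minutes_since_1900 (year : Int) (julianday : Int) (second : Int) : Int :=
  -- iref = max(i for i, y in enumerate(refyear) if y <= year); Python raises ValueError on an
  -- empty sequence (year < 1) — that case is excluded by Pre_, the .getD 0 is never the result there.
  let idxs := ((PySem.List.enumerate pvRefyear).filter (fun p => p.2 ≤ year)).map (·.1)
  let iref := (PySem.List.max? idxs (fun x => x)).getD 0
  let minutes := PySem.List.pyGetD pvRefval iref 0
  let minutes := (PySem.List.pyRange (PySem.List.pyGetD pvRefyear iref 0) year 1).foldl
      (fun m iy => if isleapyear iy then m + 527040 else m + 525600) minutes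
  minutes + (julianday - 1) * 1440 + PySem.Int.floordiv second 60

-- ===== PORT B =====
def minutes_since_1900_alt (year : Int) (julianday : Int) (second : Int) : Int :=
  let leaps := PySem.Int.floordiv (year - 1) 4 - PySem.Int.floordiv (year - 1) 100
               + PySem.Int.floordiv (year - 1) 400
  let days := 365 * (year - 1900) + leaps - 460
  days * 1440 + (julianday - 1) * 1440 + PySem.Int.floordiv second 60

-- ===== PRECONDITION & SPEC =====
-- Pre_ excludes year < 1, where A's max() of an empty sequence raises ValueError.
def Pre_minutes_since_1900 (year : Int) (julianday : Int) (second : Int) : Prop := 1 ≤ year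
instance (year : Int) (julianday : Int) (second : Int) : Decidable (Pre_minutes_since_1900 year julianday second) := by unfold Pre_minutes_since_1900; infer_instance
def pvWitness_minutes_since_1900 : Int × Int × Int := (1999, 32, 3600)

def Spec_minutes_since_1900 (year : Int) (julianday : Int) (second : Int) (out : Int) : Prop := out = minutes_since_1900_alt year julianday second
instance (year : Int) (julianday : Int) (second : Int) (out : Int) : Decidable (Spec_minutes_since_1900 year julianday second out) := by unfold Spec_minutes_since_1900; infer_instance

-- ===== CLAIM (what is proved, stated in full; the proofs are below) =====
def Claim_equal_minutes_since_1900 : Prop := ∀ (year : Int) (julianday : Int) (second : Int), Dom_minutes_since_1900 year julianday second → Pre_minutes_since_1900 year julianday second → Spec_minutes_since_1900 year julianday second (minutes_since_1900 year julianday second)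

-- ===== LEMMAS AND PROOFS =====

-- pvG y = 1440 * (365*y + number of Gregorian leap years < y), written with Euclidean division
-- (equal to Python's floor division here since all divisors are positive) — A's minute count up to
-- Jan 1 of year y, up to a constant.
def pvG (y : Int) : Int := 1440 * (365 * y + (y - 1) / 4 - (y - 1) / 100 + (y - 1) / 400)

-- one loop iteration of A adds exactly the increment of pvG
lemma pv_step_eq (y : Int) :
    (if isleapyear y then (527040 : Int) else 525600) = pvG (y + 1) - pvG y := by
  have h4 := PySem.Int.mod_eq_emod_of_pos (a := y) (b := 4) (by norm_num)
  have h100 := PySem.Int.mod_eq_emod_of_pos (a := y) (b := 100) (by norm_num)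
  have h400 := PySem.Int.mod_eq_emod_of_pos (a := y) (b := 400) (by norm_num)
  simp only [isleapyear, h4, h100, h400, pvG, Bool.or_eq_true, Bool.and_eq_true,
    Bool.not_eq_true', beq_iff_eq, beq_eq_false_iff_ne, ne_eq]
  split_ifs with h <;> omega

lemma pv_loop_sum (a : Int) (n : Nat) : ∀ (m : Int),
    (PySem.List.pyRange a (a + n) 1).foldl
        (fun m iy => if isleapyear iy then m + 527040 else m + 525600) m
      = m + (pvG (a + n) - pvG a) := by
  induction n with
  | zero => intro m; rw [PySem.List.pyRange_one_eq_nil (by omega)]; simp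
  | succ n ih =>
    intro m
    have h1 : a + ((n + 1 : Nat) : Int) = (a + n) + 1 := by push_cast; ring
    rw [h1, PySem.List.pyRange_one_succ_right (by omega), List.foldl_append, ih]
    simp only [List.foldl_cons, List.foldl_nil]
    have hs := pv_step_eq (a + n)
    split_ifs at hs ⊢ <;> omega

lemma pv_loop_sum' (a y m : Int) (h : a ≤ y) :
    (PySem.List.pyRange a y 1).foldl
        (fun m iy => if isleapyear iy then m + 527040 else m + 525600) m
      = m + (pvG y - pvG a) := by
  have hy : y = a + ((y - a).toNat : Int) := by omega
  rw [hy]; exact pv_loop_sum a (y - a).toNat m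

lemma pv_alt_eq (year julianday second : Int) :
    minutes_since_1900_alt year julianday second
      = pvG year - pvG 1900 + (julianday - 1) * 1440 + PySem.Int.floordiv second 60 := by
  simp only [minutes_since_1900_alt,
    PySem.Int.floordiv_eq_ediv_of_pos (a := year - 1) (b := 4) (by norm_num),
    PySem.Int.floordiv_eq_ediv_of_pos (a := year - 1) (b := 100) (by norm_num),
    PySem.Int.floordiv_eq_ediv_of_pos (a := year - 1) (b := 400) (by norm_num), pvG]
  ring

-- A restricted to one reference bracket equals B: start at refyear[iref]/refval[iref] and
-- telescope the loop with pv_loop_sum'.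
lemma pv_case (year julianday second : Int) (iref ry rv : Int)
    (hmax : (PySem.List.max? (((PySem.List.enumerate pvRefyear).filter (fun p => p.2 ≤ year)).map (·.1)) (fun x => x)).getD 0 = iref)
    (hry : PySem.List.pyGetD pvRefyear iref 0 = ry)
    (hrv : PySem.List.pyGetD pvRefval iref 0 = rv)
    (hle : ry ≤ year) (hc : rv = pvG ry - pvG 1900) :
    minutes_since_1900 year julianday second = minutes_since_1900_alt year julianday second := by
  simp only [minutes_since_1900]
  rw [hmax, hry, hrv, pv_loop_sum' ry year rv hle, pv_alt_eq year julianday second]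
  omega

-- ===== VERDICT (by name: the statement is the Claim_ definition above) =====
theorem minutes_since_1900_spec : Claim_equal_minutes_since_1900 := by
  intro year julianday second hdom hpre
  unfold Pre_minutes_since_1900 at hpre
  unfold Spec_minutes_since_1900
  by_cases k9 : ((2020:Int) ≤ year)
  · have he : (((PySem.List.enumerate pvRefyear).filter (fun p => p.2 ≤ year)).map (·.1)) = ([0, 1, 2, 3, 4, 5, 6, 7, 8, 9] : List Int) := by
      have t0 : ((1:Int) ≤ year) := by omega
      have t1 : ((1900:Int) ≤ year) := by omega
      have t2 : ((1950:Int) ≤ year) := by omega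
      have t3 : ((1980:Int) ≤ year) := by omega
      have t4 : ((1990:Int) ≤ year) := by omega
      have t5 : ((2000:Int) ≤ year) := by omega
      have t6 : ((2005:Int) ≤ year) := by omega
      have t7 : ((2010:Int) ≤ year) := by omega
      have t8 : ((2015:Int) ≤ year) := by omega
      have t9 : ((2020:Int) ≤ year) := by omega
      simp [pvRefyear, PySem.List.enumerate_cons, PySem.List.enumerate_nil, t0, t1, t2, t3, t4, t5, t6, t7, t8, t9]
    exact pv_case year julianday second 9 2020 63113760 (by rw [he]; decide) (by decide) (by decide) (by omega) (by decide)
  by_cases k8 : ((2015:Int) ≤ year)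
  · have he : (((PySem.List.enumerate pvRefyear).filter (fun p => p.2 ≤ year)).map (·.1)) = ([0, 1, 2, 3, 4, 5, 6, 7, 8] : List Int) := by
      have t0 : ((1:Int) ≤ year) := by omega
      have t1 : ((1900:Int) ≤ year) := by omega
      have t2 : ((1950:Int) ≤ year) := by omega
      have t3 : ((1980:Int) ≤ year) := by omega
      have t4 : ((1990:Int) ≤ year) := by omega
      have t5 : ((2000:Int) ≤ year) := by omega
      have t6 : ((2005:Int) ≤ year) := by omega
      have t7 : ((2010:Int) ≤ year) := by omega
      have t8 : ((2015:Int) ≤ year) := by omega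
      have f9 : ¬((2020:Int) ≤ year) := by omega
      simp [pvRefyear, PySem.List.enumerate_cons, PySem.List.enumerate_nil, t0, t1, t2, t3, t4, t5, t6, t7, t8, f9]
    exact pv_case year julianday second 8 2015 60484320 (by rw [he]; decide) (by decide) (by decide) (by omega) (by decide)
  by_cases k7 : ((2010:Int) ≤ year)
  · have he : (((PySem.List.enumerate pvRefyear).filter (fun p => p.2 ≤ year)).map (·.1)) = ([0, 1, 2, 3, 4, 5, 6, 7] : List Int) := by
      have t0 : ((1:Int) ≤ year) := by omega
      have t1 : ((1900:Int) ≤ year) := by omega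
      have t2 : ((1950:Int) ≤ year) := by omega
      have t3 : ((1980:Int) ≤ year) := by omega
      have t4 : ((1990:Int) ≤ year) := by omega
      have t5 : ((2000:Int) ≤ year) := by omega
      have t6 : ((2005:Int) ≤ year) := by omega
      have t7 : ((2010:Int) ≤ year) := by omega
      have f8 : ¬((2015:Int) ≤ year) := by omega
      have f9 : ¬((2020:Int) ≤ year) := by omega
      simp [pvRefyear, PySem.List.enumerate_cons, PySem.List.enumerate_nil, t0, t1, t2, t3, t4, t5, t6, t7, f8, f9]
    exact pv_case year julianday second 7 2010 57854880 (by rw [he]; decide) (by decide) (by decide) (by omega) (by decide)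
  by_cases k6 : ((2005:Int) ≤ year)
  · have he : (((PySem.List.enumerate pvRefyear).filter (fun p => p.2 ≤ year)).map (·.1)) = ([0, 1, 2, 3, 4, 5, 6] : List Int) := by
      have t0 : ((1:Int) ≤ year) := by omega
      have t1 : ((1900:Int) ≤ year) := by omega
      have t2 : ((1950:Int) ≤ year) := by omega
      have t3 : ((1980:Int) ≤ year) := by omega
      have t4 : ((1990:Int) ≤ year) := by omega
      have t5 : ((2000:Int) ≤ year) := by omega
      have t6 : ((2005:Int) ≤ year) := by omega
      have f7 : ¬((2010:Int) ≤ year) := by omega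
      have f8 : ¬((2015:Int) ≤ year) := by omega
      have f9 : ¬((2020:Int) ≤ year) := by omega
      simp [pvRefyear, PySem.List.enumerate_cons, PySem.List.enumerate_nil, t0, t1, t2, t3, t4, t5, t6, f7, f8, f9]
    exact pv_case year julianday second 6 2005 55225440 (by rw [he]; decide) (by decide) (by decide) (by omega) (by decide)
  by_cases k5 : ((2000:Int) ≤ year)
  · have he : (((PySem.List.enumerate pvRefyear).filter (fun p => p.2 ≤ year)).map (·.1)) = ([0, 1, 2, 3, 4, 5] : List Int) := by
      have t0 : ((1:Int) ≤ year) := by omega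
      have t1 : ((1900:Int) ≤ year) := by omega
      have t2 : ((1950:Int) ≤ year) := by omega
      have t3 : ((1980:Int) ≤ year) := by omega
      have t4 : ((1990:Int) ≤ year) := by omega
      have t5 : ((2000:Int) ≤ year) := by omega
      have f6 : ¬((2005:Int) ≤ year) := by omega
      have f7 : ¬((2010:Int) ≤ year) := by omega
      have f8 : ¬((2015:Int) ≤ year) := by omega
      have f9 : ¬((2020:Int) ≤ year) := by omega
      simp [pvRefyear, PySem.List.enumerate_cons, PySem.List.enumerate_nil, t0, t1, t2, t3, t4, t5, f6, f7, f8, f9]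
    exact pv_case year julianday second 5 2000 52594560 (by rw [he]; decide) (by decide) (by decide) (by omega) (by decide)
  by_cases k4 : ((1990:Int) ≤ year)
  · have he : (((PySem.List.enumerate pvRefyear).filter (fun p => p.2 ≤ year)).map (·.1)) = ([0, 1, 2, 3, 4] : List Int) := by
      have t0 : ((1:Int) ≤ year) := by omega
      have t1 : ((1900:Int) ≤ year) := by omega
      have t2 : ((1950:Int) ≤ year) := by omega
      have t3 : ((1980:Int) ≤ year) := by omega
      have t4 : ((1990:Int) ≤ year) := by omega
      have f5 : ¬((2000:Int) ≤ year) := by omega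
      have f6 : ¬((2005:Int) ≤ year) := by omega
      have f7 : ¬((2010:Int) ≤ year) := by omega
      have f8 : ¬((2015:Int) ≤ year) := by omega
      have f9 : ¬((2020:Int) ≤ year) := by omega
      simp [pvRefyear, PySem.List.enumerate_cons, PySem.List.enumerate_nil, t0, t1, t2, t3, t4, f5, f6, f7, f8, f9]
    exact pv_case year julianday second 4 1990 47335680 (by rw [he]; decide) (by decide) (by decide) (by omega) (by decide)
  by_cases k3 : ((1980:Int) ≤ year)
  · have he : (((PySem.List.enumerate pvRefyear).filter (fun p => p.2 ≤ year)).map (·.1)) = ([0, 1, 2, 3] : List Int) := by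
      have t0 : ((1:Int) ≤ year) := by omega
      have t1 : ((1900:Int) ≤ year) := by omega
      have t2 : ((1950:Int) ≤ year) := by omega
      have t3 : ((1980:Int) ≤ year) := by omega
      have f4 : ¬((1990:Int) ≤ year) := by omega
      have f5 : ¬((2000:Int) ≤ year) := by omega
      have f6 : ¬((2005:Int) ≤ year) := by omega
      have f7 : ¬((2010:Int) ≤ year) := by omega
      have f8 : ¬((2015:Int) ≤ year) := by omega
      have f9 : ¬((2020:Int) ≤ year) := by omega
      simp [pvRefyear, PySem.List.enumerate_cons, PySem.List.enumerate_nil, t0, t1, t2, t3, f4, f5, f6, f7, f8, f9]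
    exact pv_case year julianday second 3 1980 42075360 (by rw [he]; decide) (by decide) (by decide) (by omega) (by decide)
  by_cases k2 : ((1950:Int) ≤ year)
  · have he : (((PySem.List.enumerate pvRefyear).filter (fun p => p.2 ≤ year)).map (·.1)) = ([0, 1, 2] : List Int) := by
      have t0 : ((1:Int) ≤ year) := by omega
      have t1 : ((1900:Int) ≤ year) := by omega
      have t2 : ((1950:Int) ≤ year) := by omega
      have f3 : ¬((1980:Int) ≤ year) := by omega
      have f4 : ¬((1990:Int) ≤ year) := by omega
      have f5 : ¬((2000:Int) ≤ year) := by omega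
      have f6 : ¬((2005:Int) ≤ year) := by omega
      have f7 : ¬((2010:Int) ≤ year) := by omega
      have f8 : ¬((2015:Int) ≤ year) := by omega
      have f9 : ¬((2020:Int) ≤ year) := by omega
      simp [pvRefyear, PySem.List.enumerate_cons, PySem.List.enumerate_nil, t0, t1, t2, f3, f4, f5, f6, f7, f8, f9]
    exact pv_case year julianday second 2 1950 26297280 (by rw [he]; decide) (by decide) (by decide) (by omega) (by decide)
  by_cases k1 : ((1900:Int) ≤ year)
  · have he : (((PySem.List.enumerate pvRefyear).filter (fun p => p.2 ≤ year)).map (·.1)) = ([0, 1] : List Int) := by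
      have t0 : ((1:Int) ≤ year) := by omega
      have t1 : ((1900:Int) ≤ year) := by omega
      have f2 : ¬((1950:Int) ≤ year) := by omega
      have f3 : ¬((1980:Int) ≤ year) := by omega
      have f4 : ¬((1990:Int) ≤ year) := by omega
      have f5 : ¬((2000:Int) ≤ year) := by omega
      have f6 : ¬((2005:Int) ≤ year) := by omega
      have f7 : ¬((2010:Int) ≤ year) := by omega
      have f8 : ¬((2015:Int) ≤ year) := by omega
      have f9 : ¬((2020:Int) ≤ year) := by omega
      simp [pvRefyear, PySem.List.enumerate_cons, PySem.List.enumerate_nil, t0, t1, f2, f3, f4, f5, f6, f7, f8, f9]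
    exact pv_case year julianday second 1 1900 0 (by rw [he]; decide) (by decide) (by decide) (by omega) (by decide)
  have he : (((PySem.List.enumerate pvRefyear).filter (fun p => p.2 ≤ year)).map (·.1)) = ([0] : List Int) := by
      have t0 : ((1:Int) ≤ year) := by omega
      have f1 : ¬((1900:Int) ≤ year) := by omega
      have f2 : ¬((1950:Int) ≤ year) := by omega
      have f3 : ¬((1980:Int) ≤ year) := by omega
      have f4 : ¬((1990:Int) ≤ year) := by omega
      have f5 : ¬((2000:Int) ≤ year) := by omega
      have f6 : ¬((2005:Int) ≤ year) := by omega
      have f7 : ¬((2010:Int) ≤ year) := by omega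
      have f8 : ¬((2015:Int) ≤ year) := by omega
      have f9 : ¬((2020:Int) ≤ year) := by omega
      simp [pvRefyear, PySem.List.enumerate_cons, PySem.List.enumerate_nil, t0, f1, f2, f3, f4, f5, f6, f7, f8, f9]
  exact pv_case year julianday second 0 1 (-998776800) (by rw [he]; decide) (by decide) (by decide) (by omega) (by decide)
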